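-- pv_equiv track=rewrite | github.com/KBesada24/ScheduleFirst-AI | services/mcp_server/utils/validators.py | validate_days_string
-- ===== SOURCE A (Python) =====
-- def validate_days_string(days: str) -> bool:
--     """
--     Validate days string format (e.g., MWF, TTh, M, Online)
--     """
--     if not days:
--         return False
--
--     if days.lower() in ['online', 'tba', 'arranged']:
--         return True
--
--     # Valid day codes: M, T, W, Th, F, S, Su
--     valid_codes = {'M', 'T', 'W', 'Th', 'F', 'S', 'Su'}
--
--     # Parse the days string
--     i = 0
--     while i < len(days):
--         if i + 1 < len(days) and days[i:i+2] in valid_codes: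
--             i += 2
--         elif days[i] in valid_codes:
--             i += 1
--         else:
--             return False
--
--     return True
-- ===== SOURCE B (Python) =====
-- def validate_days_string(days: str) -> bool:
--     """
--     Validate days string format (e.g., MWF, TTh, M, Online)
--
--     Single local pass: every character must be a day letter, and 'h'/'u'
--     (which only occur as the second letter of 'Th'/'Su') must be
--     immediately preceded by 'T'/'S' respectively.
--     """
--     if not days:
--         return False
--     if days.lower() in ('online', 'tba', 'arranged'):
--         return True
--     prev = ''
--     for c in days:
--         if c not in 'MTWFShu':
--             return False
--         if c == 'h' and prev != 'T':
--             return False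
--         if c == 'u' and prev != 'S':
--             return False
--         prev = c
--     return True
-- ===== Notes on version B (the rewrite author's own statement) =====
-- stated objective: simpler
-- what changed: Replaced A's index-advancing greedy parser (try two-char code, else one-char code) by a single local pass that checks each character is a day letter and that 'h'/'u' are immediately preceded by 'T'/'S'.
import Mathlib
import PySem

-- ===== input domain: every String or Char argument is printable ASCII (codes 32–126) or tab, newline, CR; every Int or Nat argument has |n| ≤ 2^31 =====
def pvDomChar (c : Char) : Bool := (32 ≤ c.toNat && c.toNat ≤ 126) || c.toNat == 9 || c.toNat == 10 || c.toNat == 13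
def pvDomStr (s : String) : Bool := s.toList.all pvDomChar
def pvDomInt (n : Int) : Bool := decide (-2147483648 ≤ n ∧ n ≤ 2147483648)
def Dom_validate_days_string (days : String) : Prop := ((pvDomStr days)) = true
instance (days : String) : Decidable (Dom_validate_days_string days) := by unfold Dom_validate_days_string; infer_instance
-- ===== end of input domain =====

-- B replaces A's index-advancing greedy two-char-then-one-char scan by a single
-- local pass checking each character against its predecessor (objective: simpler).

-- ===== PORT A =====
-- valid_codes = {'M', 'T', 'W', 'Th', 'F', 'S', 'Su'}
def pvCodes : PySem.Set String := PySem.Set.ofList ["M", "T", "W", "Th", "F", "S", "Su"]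

-- A's while-loop; the state is the suffix of the character list starting at index i
def pvLoopA : List Char → Bool
  | [] => true
  | c1 :: rest =>
    match rest with
    | c2 :: rest2 =>
      if String.ofList [c1, c2] ∈ pvCodes then pvLoopA rest2
      else if String.ofList [c1] ∈ pvCodes then pvLoopA (c2 :: rest2)
      else false
    | [] =>
      if String.ofList [c1] ∈ pvCodes then pvLoopA []
      else false

def validate_days_string (days : String) : Bool :=
  if days.toList = [] then false
  else if (PySem.Str.lower days) ∈ (["online", "tba", "arranged"] : List String) then true
  else pvLoopA days.toList

-- ===== PORT B =====
-- B's for-loop; prev = none plays Python's initial prev = ''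
def pvLoopB : Option Char → List Char → Bool
  | _, [] => true
  | prev, c :: rest =>
    if ¬ (c ∈ ['M', 'T', 'W', 'F', 'S', 'h', 'u']) then false
    else if c = 'h' ∧ prev ≠ some 'T' then false
    else if c = 'u' ∧ prev ≠ some 'S' then false
    else pvLoopB (some c) rest

def validate_days_string_alt (days : String) : Bool :=
  if days.toList = [] then false
  else if (PySem.Str.lower days) ∈ (["online", "tba", "arranged"] : List String) then true
  else pvLoopB none days.toList

-- ===== PRECONDITION & SPEC =====
def Spec_validate_days_string (days : String) (out : Bool) : Prop := out = validate_days_string_alt days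
instance (days : String) (out : Bool) : Decidable (Spec_validate_days_string days out) := by unfold Spec_validate_days_string; infer_instance

-- ===== CLAIM (what is proved, stated in full; the proofs are below) =====
def Claim_equal_validate_days_string : Prop := ∀ (days : String), Dom_validate_days_string days → Spec_validate_days_string days (validate_days_string days)

-- ===== LEMMAS AND PROOFS =====

theorem pvOfList_eq (l : List Char) (s : String) : String.ofList l = s ↔ l = s.toList :=
  ⟨fun h => by rw [← h]; simp, fun h => by rw [h]; simp⟩
theorem pvTwo_mem (c1 c2 : Char) :
    (String.ofList [c1, c2] ∈ pvCodes) ↔ (c1 = 'T' ∧ c2 = 'h') ∨ (c1 = 'S' ∧ c2 = 'u') := by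
  simp [pvCodes, PySem.Set.mem_ofList, pvOfList_eq]
theorem pvOne_mem (c : Char) :
    (String.ofList [c] ∈ pvCodes) ↔ c ∈ (['M', 'T', 'W', 'F', 'S'] : List Char) := by
  simp [pvCodes, PySem.Set.mem_ofList, pvOfList_eq]
def pvOk (prev : Option Char) : List Char → Prop
  | [] => True
  | c :: _ => ¬ (c = 'h' ∧ prev = some 'T') ∧ ¬ (c = 'u' ∧ prev = some 'S')
theorem pvB_false (prev : Option Char) (c1 : Char) (rest : List Char)
    (hone : String.ofList [c1] ∉ pvCodes) (hok : pvOk prev (c1 :: rest)) :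
    pvLoopB prev (c1 :: rest) = false := by
  have h5 : c1 ∉ (['M', 'T', 'W', 'F', 'S'] : List Char) := fun hm => hone ((pvOne_mem c1).mpr hm)
  by_cases hh : c1 = 'h'
  · subst hh
    have : prev ≠ some 'T' := fun hp => hok.1 ⟨rfl, hp⟩
    simp [pvLoopB, this]
  · by_cases hu : c1 = 'u'
    · subst hu
      have : prev ≠ some 'S' := fun hp => hok.2 ⟨rfl, hp⟩
      simp [pvLoopB, this]
    · have : ¬ (c1 ∈ (['M', 'T', 'W', 'F', 'S', 'h', 'u'] : List Char)) := by
        simp_all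
      simp [pvLoopB, this]

theorem pvLoop_eq (cs : List Char) : ∀ (prev : Option Char), pvOk prev cs →
    pvLoopA cs = pvLoopB prev cs := by
  induction cs using pvLoopA.induct with
  | case1 => intro prev _; rfl
  | case2 c1 c2 r h ih =>
    intro prev hok
    rcases (pvTwo_mem c1 c2).mp h with ⟨rfl, rfl⟩ | ⟨rfl, rfl⟩
    · rw [show pvLoopA ('T' :: 'h' :: r) = pvLoopA r by simp [pvLoopA, h]]
      rw [show pvLoopB prev ('T' :: 'h' :: r) = pvLoopB (some 'h') r by simp [pvLoopB]]
      exact ih (some 'h') (by cases r <;> simp [pvOk])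
    · rw [show pvLoopA ('S' :: 'u' :: r) = pvLoopA r by simp [pvLoopA, h]]
      rw [show pvLoopB prev ('S' :: 'u' :: r) = pvLoopB (some 'u') r by simp [pvLoopB]]
      exact ih (some 'u') (by cases r <;> simp [pvOk])
  | case3 c1 c2 r h1 h2 ih =>
    intro prev hok
    have hok' : pvOk (some c1) (c2 :: r) := by
      constructor
      · rintro ⟨rfl, hc⟩
        exact h1 ((pvTwo_mem c1 'h').mpr (Or.inl ⟨by injection hc, rfl⟩))
      · rintro ⟨rfl, hc⟩
        exact h1 ((pvTwo_mem c1 'u').mpr (Or.inr ⟨by injection hc, rfl⟩))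
    rw [show pvLoopA (c1 :: c2 :: r) = pvLoopA (c2 :: r) by simp [pvLoopA, h1, h2]]
    rw [ih (some c1) hok']
    rcases (by simpa using (pvOne_mem c1).mp h2 : c1 = 'M' ∨ c1 = 'T' ∨ c1 = 'W' ∨ c1 = 'F' ∨ c1 = 'S') with rfl | rfl | rfl | rfl | rfl <;> simp [pvLoopB]
  | case4 c1 c2 r h1 h2 =>
    intro prev hok
    rw [show pvLoopA (c1 :: c2 :: r) = false by simp [pvLoopA, h1, h2]]
    exact (pvB_false prev c1 (c2 :: r) h2 hok).symm
  | case5 c1 h ih =>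
    intro prev hok
    rw [show pvLoopA [c1] = true by simp [pvLoopA, h]]
    rcases (by simpa using (pvOne_mem c1).mp h : c1 = 'M' ∨ c1 = 'T' ∨ c1 = 'W' ∨ c1 = 'F' ∨ c1 = 'S') with rfl | rfl | rfl | rfl | rfl <;> simp [pvLoopB]
  | case6 c1 h =>
    intro prev hok
    rw [show pvLoopA [c1] = false by simp [pvLoopA, h]]
    exact (pvB_false prev c1 [] h hok).symm

-- ===== VERDICT (by name: the statement is the Claim_ definition above) =====
theorem validate_days_string_spec : Claim_equal_validate_days_string := by
  intro days _
  unfold Spec_validate_days_string validate_days_string validate_days_string_alt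
  split_ifs with h1 h2
  · rfl
  · rfl
  · exact pvLoop_eq days.toList none (by cases days.toList <;> simp [pvOk])
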